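-- pv_equiv track=rewrite | github.com/DrJackilD/adventofcode2024 | day_2.py | is_safe_decreasing
-- ===== SOURCE A (Python) =====
-- SKIPS_ALLOWED = 1
--
-- def is_safe_decreasing(nums: list[int], skips: int = 0) -> bool:
--     for i in range(1, len(nums)):
--         diff = nums[i - 1] - nums[i]
--         if diff < 1 or diff > 3:
--             if skips < SKIPS_ALLOWED:
--                 return is_safe_decreasing(
--                     nums[:i] + nums[i + 1 :], skips + 1
--                 ) or is_safe_decreasing(nums[: i - 1] + nums[i:], skips + 1)
--             return False
--     return True
-- ===== SOURCE B (Python) =====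
-- SKIPS_ALLOWED = 1
--
--
-- def _strict(seq):
--     return all(1 <= x - y <= 3 for x, y in zip(seq, seq[1:]))
--
--
-- def is_safe_decreasing(nums: list[int], skips: int = 0) -> bool:
--     if _strict(nums):
--         return True
--     if skips >= SKIPS_ALLOWED:
--         return False
--     return any(_strict(nums[:j] + nums[j + 1:]) for j in range(len(nums)))
-- ===== Notes on version B (the rewrite author's own statement) =====
-- stated objective: simpler
-- what changed: Replaced A's first-violation recursion (which recursively retries after removing element i or i-1) with a flat strict-pair checker plus an exhaustive single-removal scan; correct because any repairing removal must touch the first violating pair.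
-- outside the precondition, e.g. on is_safe_decreasing([5, 5, 5], -1): A returns True, B returns False
import Mathlib
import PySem

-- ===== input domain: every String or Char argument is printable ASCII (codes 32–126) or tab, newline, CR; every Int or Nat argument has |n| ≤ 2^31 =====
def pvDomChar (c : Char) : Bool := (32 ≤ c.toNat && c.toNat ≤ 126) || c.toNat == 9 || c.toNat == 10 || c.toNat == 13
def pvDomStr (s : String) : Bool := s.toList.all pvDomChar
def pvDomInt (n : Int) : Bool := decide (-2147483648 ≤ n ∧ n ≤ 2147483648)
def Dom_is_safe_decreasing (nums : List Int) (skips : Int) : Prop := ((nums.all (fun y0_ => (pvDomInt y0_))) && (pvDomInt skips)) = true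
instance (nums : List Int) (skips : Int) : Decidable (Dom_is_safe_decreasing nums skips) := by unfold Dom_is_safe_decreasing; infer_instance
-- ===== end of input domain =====

-- B replaces A's first-violation recursion by a flat strict-pair checker plus an
-- exhaustive single-removal scan (simpler decomposition; no recursion).

-- ===== PORT A =====
-- termination facts for the port's well-founded recursion (cited by name in decreasing_by;
-- proved by hand to keep the proof terms small)
theorem pvSubA (a b : Nat) (h : b < a) : b + (a - (b + 1)) < a :=
  calc b + (a - (b + 1)) < (b + 1) + (a - (b + 1)) := Nat.add_lt_add_right (Nat.lt_succ_self b) _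
    _ = a := Nat.add_sub_cancel' h

theorem pvTermA1 (a b : Nat) (h : b < a) :
    min b a + (a - (b + 1)) < a ∨ min b a + (a - (b + 1)) = a ∧ min b a + (a - (b + 1)) - 1 < a - b := by
  left
  rw [Nat.min_eq_left (Nat.le_of_lt h)]
  exact pvSubA a b h

theorem pvTermA2 (a b : Nat) (h : b < a) :
    min (b - 1) a + (a - b) < a ∨ min (b - 1) a + (a - b) = a ∧ min (b - 1) a + (a - b) - 1 < a - b := by
  cases b with
  | zero =>
    right
    rw [Nat.min_eq_left (Nat.zero_le a), Nat.zero_add]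
    exact ⟨rfl, Nat.sub_lt h Nat.one_pos⟩
  | succ b =>
    left
    rw [Nat.succ_sub_one, Nat.min_eq_left (Nat.le_of_lt (Nat.lt_of_le_of_lt (Nat.le_succ b) h))]
    exact pvSubA a b (Nat.lt_of_le_of_lt (Nat.le_succ b) h)

theorem pvTermA3 (a b : Nat) (h : b < a) : a < a ∨ a - (b + 1) < a - b :=
  Or.inr (Nat.sub_lt_sub_left h (Nat.lt_succ_self b))

-- the loop 'for i in range(1, len(nums))' with its two recursive skip calls; the indices
-- i-1 and i are always in range inside the loop, so List.getD is exact there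
def is_safe_decreasing_go (nums : List Int) (skips : Int) (i : Nat) : Bool :=
  if h : i < nums.length then
    let diff := nums.getD (i - 1) 0 - nums.getD i 0
    if diff < 1 ∨ diff > 3 then
      if skips < 1 then
        is_safe_decreasing_go (nums.take i ++ nums.drop (i + 1)) (skips + 1) 1 ||
        is_safe_decreasing_go (nums.take (i - 1) ++ nums.drop i) (skips + 1) 1
      else false
    else is_safe_decreasing_go nums skips (i + 1)
  else true
termination_by (nums.length, nums.length - i)
decreasing_by
  all_goals simp only [Prod.lex_def, List.length_append, List.length_take, List.length_drop, true_and]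
  · exact pvTermA1 _ _ h
  · exact pvTermA2 _ _ h
  · exact pvTermA3 _ _ h

def is_safe_decreasing (nums : List Int) (skips : Int) : Bool :=
  is_safe_decreasing_go nums skips 1

-- ===== PORT B =====
-- _strict(seq): every adjacent difference lies in 1..3
def strictB : List Int → Bool
  | a :: b :: t => (1 ≤ a - b && a - b ≤ 3) && strictB (b :: t)
  | _ => true

def is_safe_decreasing_alt (nums : List Int) (skips : Int) : Bool :=
  if strictB nums then true
  else if 1 ≤ skips then false
  else (List.range nums.length).any (fun j => strictB (nums.take j ++ nums.drop (j + 1)))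

-- ===== PRECONDITION & SPEC =====
-- Pre_ restricts skips to its natural domain 0 ≤ skips (skips counts removals already used;
-- a negative skips would let A remove more than SKIPS_ALLOWED elements, which B's
-- single-removal scan deliberately does not emulate).
def Pre_is_safe_decreasing (nums : List Int) (skips : Int) : Prop := 0 ≤ skips
instance (nums : List Int) (skips : Int) : Decidable (Pre_is_safe_decreasing nums skips) := by unfold Pre_is_safe_decreasing; infer_instance

def pvWitness_is_safe_decreasing : List Int × Int := ([9, 7, 4, 3], 0)

def Spec_is_safe_decreasing (nums : List Int) (skips : Int) (out : Bool) : Prop := out = is_safe_decreasing_alt nums skips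
instance (nums : List Int) (skips : Int) (out : Bool) : Decidable (Spec_is_safe_decreasing nums skips out) := by unfold Spec_is_safe_decreasing; infer_instance

-- ===== CLAIM (what is proved, stated in full; the proofs are below) =====
def Claim_equal_is_safe_decreasing : Prop := ∀ (nums : List Int) (skips : Int), Dom_is_safe_decreasing nums skips → Pre_is_safe_decreasing nums skips → Spec_is_safe_decreasing nums skips (is_safe_decreasing nums skips)

-- ===== LEMMAS AND PROOFS =====

-- the adjacent pair starting at index k is in range 1..3
def okP (l : List Int) (k : Nat) : Prop :=
  1 ≤ l.getD k 0 - l.getD (k + 1) 0 ∧ l.getD k 0 - l.getD (k + 1) 0 ≤ 3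

theorem strictB_char : ∀ (l : List Int),
    strictB l = true ↔ ∀ k, k + 1 < l.length → okP l k := by
  intro l
  induction l with
  | nil => simp [strictB]
  | cons a t ih =>
    cases t with
    | nil =>
      simp only [strictB, List.length_cons, List.length_nil, true_iff]
      intro k hk; omega
    | cons b t2 =>
      rw [show strictB (a :: b :: t2) = ((1 ≤ a - b && a - b ≤ 3) && strictB (b :: t2)) from rfl]
      rw [Bool.and_eq_true, ih]
      constructor
      · rintro ⟨hab, hrest⟩ k hk
        cases k with
        | zero =>
          simp only [Bool.and_eq_true, decide_eq_true_eq] at hab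
          simpa [okP, List.getD_cons_zero, List.getD_cons_succ] using hab
        | succ k' =>
          have := hrest k' (by simpa using by simp at hk; omega)
          simpa [okP, List.getD_cons_succ] using this
      · intro hall
        constructor
        · have := hall 0 (by simp)
          simp only [okP, List.getD_cons_zero, List.getD_cons_succ] at this
          simp only [Bool.and_eq_true, decide_eq_true_eq]
          exact this
        · intro k hk
          have := hall (k + 1) (by simp at hk ⊢; omega)
          simpa [okP, List.getD_cons_succ] using this

-- with skips ≥ 1 the loop is a pure strict check of the pairs from index i-1 on
theorem go_ge_one : ∀ (n : Nat) (nums : List Int) (skips : Int) (i : Nat),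
    nums.length - i ≤ n → 1 ≤ skips → 1 ≤ i →
    (is_safe_decreasing_go nums skips i = true ↔
      ∀ k, i ≤ k + 1 → k + 1 < nums.length → okP nums k) := by
  intro n
  induction n with
  | zero =>
    intro nums skips i hn hs hi
    rw [is_safe_decreasing_go]
    have h : ¬ i < nums.length := by omega
    simp only [h, dif_neg, not_false_iff, true_iff]
    intro k h1 h2
    exact absurd h2 (by omega)
  | succ n ih =>
    intro nums skips i hn hs hi
    rw [is_safe_decreasing_go]
    by_cases h : i < nums.length
    · simp only [h, dif_pos]
      obtain ⟨m, rfl⟩ : ∃ m, i = m + 1 := ⟨i - 1, by omega⟩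
      simp only [Nat.add_sub_cancel]
      by_cases hbad : nums.getD m 0 - nums.getD (m + 1) 0 < 1 ∨ nums.getD m 0 - nums.getD (m + 1) 0 > 3
      · have hns : ¬ skips < 1 := by omega
        simp only [hbad, if_pos, hns, if_neg, not_false_iff]
        constructor
        · intro hfalse; exact absurd hfalse (by simp)
        · intro hall
          exact absurd (hall m le_rfl h) (by unfold okP; omega)
      · simp only [hbad, if_neg, not_false_iff]
        rw [ih nums skips (m + 2) (by omega) hs (by omega)]
        constructor
        · intro hrest k hk hklen
          rcases Nat.lt_or_ge k (m + 1) with hlt | hge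
          · have : k = m := by omega
            subst this; unfold okP; omega
          · exact hrest k (by omega) hklen
        · intro hall k hk hklen; exact hall k (by omega) hklen
    · simp only [h, dif_neg, not_false_iff, true_iff]
      intro k h1 h2
      exact absurd h2 (by omega)

theorem go_ge_one_strict (nums : List Int) (skips : Int) (hs : 1 ≤ skips) :
    is_safe_decreasing_go nums skips 1 = strictB nums := by
  rw [Bool.eq_iff_iff, go_ge_one nums.length nums skips 1 (by omega) hs le_rfl, strictB_char]
  constructor
  · intro hall k hk; exact hall k (by omega) hk
  · intro hall k _ hk; exact hall k hk

-- reading elements of the single-removal list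
theorem rem_getD_lt (nums : List Int) (j m : Nat) (hm : m < j) :
    (nums.take j ++ nums.drop (j + 1)).getD m 0 = nums.getD m 0 := by
  rcases Nat.lt_or_ge m nums.length with hml | hml
  · rw [List.getD_eq_getElem?_getD, List.getD_eq_getElem?_getD,
      List.getElem?_append_left (by simp; omega)]
    congr 1
    rw [List.getElem?_take_of_lt hm]
  · rw [List.getD_eq_getElem?_getD, List.getD_eq_getElem?_getD,
      List.getElem?_eq_none (l := nums) (by omega),
      List.getElem?_eq_none (by simp; omega)]

theorem rem_getD_ge (nums : List Int) (j m : Nat) (hj : j ≤ nums.length) (hm : j ≤ m) :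
    (nums.take j ++ nums.drop (j + 1)).getD m 0 = nums.getD (m + 1) 0 := by
  rw [List.getD_eq_getElem?_getD, List.getD_eq_getElem?_getD,
    List.getElem?_append_right (by simp; omega), List.getElem?_drop]
  congr 2
  simp only [List.length_take]
  omega

-- if the pair starting at m is bad, removing any j ∉ {m, m+1} cannot make the list strict
theorem no_other_removal (nums : List Int) (m j : Nat)
    (hml : m + 1 < nums.length) (hjl : j < nums.length)
    (hbad : ¬ okP nums m) (hjm : j ≠ m) (hjm1 : j ≠ m + 1)
    (hstrict : strictB (nums.take j ++ nums.drop (j + 1)) = true) : False := by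
  rw [strictB_char] at hstrict
  have hlen : (nums.take j ++ nums.drop (j + 1)).length = nums.length - 1 := by
    simp only [List.length_append, List.length_take, List.length_drop]; omega
  rcases Nat.lt_or_ge j m with hlt | hge
  · -- j < m : the bad pair sits at positions (m-1, m) of the removal list
    have := hstrict (m - 1) (by omega)
    unfold okP at this
    rw [rem_getD_ge nums j (m - 1) (by omega) (by omega),
        rem_getD_ge nums j (m - 1 + 1) (by omega) (by omega)] at this
    have e1 : m - 1 + 1 = m := by omega
    rw [e1] at this
    exact hbad this
  · -- j > m + 1 : the bad pair is untouched
    have hj2 : m + 1 < j := by omega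
    have := hstrict m (by omega)
    unfold okP at this
    rw [rem_getD_lt nums j m (by omega), rem_getD_lt nums j (m + 1) (by omega)] at this
    exact hbad this

-- the main loop invariant for skips = 0: all pairs before i are ok
theorem go_zero : ∀ (n : Nat) (nums : List Int) (i : Nat),
    nums.length - i ≤ n → 1 ≤ i →
    (∀ k, k + 1 < i → okP nums k) →
    is_safe_decreasing_go nums 0 i = is_safe_decreasing_alt nums 0 := by
  intro n
  induction n with
  | zero =>
    intro nums i hn hi hinv
    rw [is_safe_decreasing_go]
    have h : ¬ i < nums.length := by omega
    simp only [h, dif_neg, not_false_iff]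
    have hstrict : strictB nums = true := by
      rw [strictB_char]; intro k hk; exact hinv k (by omega)
    simp [is_safe_decreasing_alt, hstrict]
  | succ n ih =>
    intro nums i hn hi hinv
    rw [is_safe_decreasing_go]
    by_cases h : i < nums.length
    · simp only [h, dif_pos]
      obtain ⟨m, rfl⟩ : ∃ m, i = m + 1 := ⟨i - 1, by omega⟩
      simp only [Nat.add_sub_cancel]
      by_cases hbad : nums.getD m 0 - nums.getD (m + 1) 0 < 1 ∨ nums.getD m 0 - nums.getD (m + 1) 0 > 3
      · simp only [hbad, if_pos, show (0:Int) < 1 by norm_num, if_pos]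
        rw [go_ge_one_strict _ _ (by norm_num), go_ge_one_strict _ _ (by norm_num)]
        have hbad' : ¬ okP nums m := by unfold okP; omega
        have hnotstrict : strictB nums = false := by
          rw [Bool.eq_false_iff]
          intro hstr
          rw [strictB_char] at hstr
          exact hbad' (hstr m h)
        simp only [is_safe_decreasing_alt, hnotstrict, Bool.false_eq_true, if_neg,
          not_false_iff, show ¬ (1:Int) ≤ 0 by norm_num]
        rw [Bool.eq_iff_iff, Bool.or_eq_true, List.any_eq_true]
        constructor
        · rintro (hA | hB)
          · exact ⟨m + 1, by simp only [List.mem_range]; omega, hA⟩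
          · exact ⟨m, by simp only [List.mem_range]; omega, hB⟩
        · rintro ⟨j, hjmem, hjstr⟩
          simp only [List.mem_range] at hjmem
          by_cases hjm1 : j = m + 1
          · left; rw [← hjm1]; exact hjstr
          by_cases hjm : j = m
          · right; rw [← hjm]; exact hjstr
          exact absurd hjstr (fun hs => no_other_removal nums m j h hjmem hbad' hjm hjm1 hs)
      · simp only [hbad, if_neg, not_false_iff]
        exact ih nums (m + 2) (by omega) (by omega) (by
          intro k hk
          rcases Nat.lt_or_ge (k + 1) (m + 1) with hlt | hge
          · exact hinv k hlt
          · have : k = m := by omega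
            subst this; unfold okP; omega)
    · simp only [h, dif_neg, not_false_iff]
      have hstrict : strictB nums = true := by
        rw [strictB_char]; intro k hk; exact hinv k (by omega)
      simp [is_safe_decreasing_alt, hstrict]

-- ===== VERDICT (by name: the statement is the Claim_ definition above) =====
theorem is_safe_decreasing_spec : Claim_equal_is_safe_decreasing := by
  intro nums skips _ hpre
  unfold Spec_is_safe_decreasing is_safe_decreasing
  by_cases h0 : skips = 0
  · subst h0
    exact go_zero nums.length nums 1 (by omega) le_rfl (by intro k hk; omega)
  · have h1 : 1 ≤ skips := by
      unfold Pre_is_safe_decreasing at hpre; omega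
    rw [go_ge_one_strict nums skips h1]
    unfold is_safe_decreasing_alt
    by_cases hs : strictB nums = true <;> simp [hs, h1]
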